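-- pv_equiv track=rewrite | github.com/EarthSciML/moves.rs | characterization/default-db-schema/audit-schema.py | _size_bucket
-- ===== SOURCE A (Python) =====
-- SIZE_BUCKETS = [
--     ("empty", 1),               # populated at run time, ships empty
--     ("tiny", 100),              # < 100 rows
--     ("small", 10_000),          # < 10k rows — monolithic threshold from plan
--     ("medium", 1_000_000),      # < 1M rows
--     ("large", 50_000_000),      # < 50M rows
--     ("huge", float("inf")),
-- ]
--
-- def _size_bucket(rows):
--     if rows is None:
--         return "unknown"
--     if rows == 0:
--         return "empty"
--     for bucket, limit in SIZE_BUCKETS: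
--         if rows < limit:
--             return bucket
--     return "huge"
-- ===== SOURCE B (Python) =====
-- import bisect
--
-- _THRESHOLDS = [1, 100, 10_000, 1_000_000, 50_000_000]
-- _LABELS = ["empty", "tiny", "small", "medium", "large", "huge"]
--
-- def _size_bucket(rows):
--     if rows is None:
--         return "unknown"
--     return _LABELS[bisect.bisect_right(_THRESHOLDS, rows)]
-- ===== Notes on version B (the rewrite author's own statement) =====
-- stated objective: idiomatic
-- what changed: Replaced the linear scan over SIZE_BUCKETS and the redundant rows==0 branch with a single binary-search lookup: bisect_right over a sorted threshold list indexing a parallel label list.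
import Mathlib
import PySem

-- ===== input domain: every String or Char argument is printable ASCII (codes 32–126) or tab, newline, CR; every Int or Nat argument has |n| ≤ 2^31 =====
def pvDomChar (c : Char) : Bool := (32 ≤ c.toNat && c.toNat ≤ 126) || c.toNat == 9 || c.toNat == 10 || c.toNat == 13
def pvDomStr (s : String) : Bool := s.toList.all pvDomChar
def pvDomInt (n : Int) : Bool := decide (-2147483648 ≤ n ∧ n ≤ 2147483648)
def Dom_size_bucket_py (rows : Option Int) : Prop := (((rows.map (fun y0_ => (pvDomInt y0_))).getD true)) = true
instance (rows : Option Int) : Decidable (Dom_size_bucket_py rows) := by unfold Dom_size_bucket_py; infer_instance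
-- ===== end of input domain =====

-- B replaces A's linear scan and redundant rows==0 branch by one bisect_right lookup
-- in a sorted threshold table (objective: idiomatic).

-- ===== PORT A =====
-- SIZE_BUCKETS: the float("inf") limit is modelled as `none` (every int is < inf).
def pySIZE_BUCKETS : List (String × Option Int) :=
  [("empty", some 1), ("tiny", some 100), ("small", some 10000),
   ("medium", some 1000000), ("large", some 50000000), ("huge", none)]

-- `rows < limit`: true for every int when limit is inf (`none`)
def pyLtLimit (r : Int) (limit : Option Int) : Bool :=
  match limit with | some v => r < v | none => true

-- the `for bucket, limit in SIZE_BUCKETS: if rows < limit: return bucket` loop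
def pySizeLoop (bs : List (String × Option Int)) (r : Int) : Option String :=
  match bs with
  | [] => none
  | (bucket, limit) :: rest =>
      if pyLtLimit r limit then some bucket
      else pySizeLoop rest r

def size_bucket_py (rows : Option Int) : String :=
  match rows with
  | none => "unknown"
  | some r =>
      if r = 0 then "empty"
      else ((pySizeLoop pySIZE_BUCKETS r).getD "huge")

-- ===== PORT B =====
def pvThresholds : List Int := [1, 100, 10000, 1000000, 50000000]
def pvLabels : List String := ["empty", "tiny", "small", "medium", "large", "huge"]

-- _LABELS[bisect.bisect_right(...)]: the index is always ≤ 5 < 6, so the Python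
-- indexing never raises; ported with getD (default never reached).
def size_bucket_py_alt (rows : Option Int) : String :=
  match rows with
  | none => "unknown"
  | some r => pvLabels.getD (PySem.List.bisectRight pvThresholds r) ""

-- ===== PRECONDITION & SPEC =====
def Spec_size_bucket_py (rows : Option Int) (out : String) : Prop := out = size_bucket_py_alt rows
instance (rows : Option Int) (out : String) : Decidable (Spec_size_bucket_py rows out) := by unfold Spec_size_bucket_py; infer_instance

-- ===== CLAIM (what is proved, stated in full; the proofs are below) =====
def Claim_equal_size_bucket_py : Prop := ∀ (rows : Option Int), Dom_size_bucket_py rows → Spec_size_bucket_py rows (size_bucket_py rows)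

-- ===== LEMMAS AND PROOFS =====

lemma bisect_eval (r : Int) :
    PySem.List.bisectRight pvThresholds r =
      if r < 1 then 0 else if r < 100 then 1 else if r < 10000 then 2
      else if r < 1000000 then 3 else if r < 50000000 then 4 else 5 := by
  obtain ⟨hle, hlt, hgt⟩ := PySem.List.bisectRight_spec pvThresholds r (by decide)
  set n := PySem.List.bisectRight pvThresholds r with hn
  have e0 := hlt 0 (by decide); have e1 := hlt 1 (by decide)
  have e2 := hlt 2 (by decide); have e3 := hlt 3 (by decide)
  have e4 := hlt 4 (by decide)
  have f0 := hgt 0 (by decide); have f1 := hgt 1 (by decide)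
  have f2 := hgt 2 (by decide); have f3 := hgt 3 (by decide)
  have f4 := hgt 4 (by decide)
  simp [pvThresholds] at hle e0 e1 e2 e3 e4 f0 f1 f2 f3 f4
  split_ifs <;> omega

-- ===== VERDICT (by name: the statement is the Claim_ definition above) =====
theorem size_bucket_py_spec : Claim_equal_size_bucket_py := by
  intro rows _
  unfold Spec_size_bucket_py size_bucket_py size_bucket_py_alt
  cases rows with
  | none => rfl
  | some r =>
      simp only [bisect_eval r]
      by_cases h0 : r = 0
      · subst h0; decide
      · simp only [if_neg h0]
        simp only [pySizeLoop, pySIZE_BUCKETS, pyLtLimit]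
        split_ifs <;> (try simp only [decide_eq_true_eq] at *) <;> first | decide | omega
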